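-- pv_equiv track=rewrite | github.com/melmanss/Hillel_Python_Project | H_W/analysis_algorithms/filling_list_cubes_numbers.py | generate_cube_numbers
-- ===== SOURCE A (Python) =====
-- from typing import Iterator
--
-- def generate_cube_numbers(end: int) -> Iterator[int]:
--     """
--     Генерує куби чисел, починаючи з 2, доки значення не перевищує межу.
--
--     Args:
--         end: Верхня межа для значень кубів (включно).
--
--     Yields:
--         Куб чергового цілого числа (num ** 3).
--     """
--     num = 2
--     while True:
--         cube = num ** 3
--         if cube > end:
--             return
--         yield cube
--         num += 1
-- ===== SOURCE B (Python) =====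
-- def generate_cube_numbers(end):
--     # Bounded decomposition: binary-search the integer cube-root k (largest k with
--     # k**3 <= end), then one straight pass over range(2, k+1).
--     if end < 8:
--         return
--     lo, hi = 2, end
--     while lo < hi:
--         mid = (lo + hi + 1) // 2
--         if mid ** 3 <= end:
--             lo = mid
--         else:
--             hi = mid - 1
--     for i in range(2, lo + 1):
--         yield i ** 3
-- ===== Notes on version B (the rewrite author's own statement) =====
-- stated objective: alternative
-- what changed: Replaced the open-ended while-True test-and-return loop by first binary-searching the largest integer k whose cube does not exceed the limit and then emitting the cubes of two through k in one bounded range pass.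
import Mathlib
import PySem

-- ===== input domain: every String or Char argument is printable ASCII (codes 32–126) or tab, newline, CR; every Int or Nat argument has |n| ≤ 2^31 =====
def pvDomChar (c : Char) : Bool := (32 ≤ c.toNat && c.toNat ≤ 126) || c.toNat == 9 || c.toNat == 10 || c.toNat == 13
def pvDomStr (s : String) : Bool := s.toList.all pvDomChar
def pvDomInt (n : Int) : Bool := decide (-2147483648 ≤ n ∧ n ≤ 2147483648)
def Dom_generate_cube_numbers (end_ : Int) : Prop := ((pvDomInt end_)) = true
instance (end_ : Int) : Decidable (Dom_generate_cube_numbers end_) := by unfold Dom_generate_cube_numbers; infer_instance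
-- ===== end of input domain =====

-- B replaces A's open-ended test-and-return loop by binary-searching the integer
-- cube root up front and then one bounded pass; same outputs (alternative decomposition).

-- ===== PORT A =====
-- A's while-True loop: num starts at 2, stops as soon as num^3 > end_.
def pvGoA (end_ num : Int) (h : 2 ≤ num) : List Int :=
  if num ^ 3 > end_ then []
  else num ^ 3 :: pvGoA end_ (num + 1) (by omega)
termination_by (end_ + 1 - num).toNat
decreasing_by
  have h1 : num ≤ num ^ 3 := le_self_pow₀ (by omega) (by norm_num)
  have _h2 : num ^ 3 ≤ end_ := by omega
  omega

def generate_cube_numbers (end_ : Int) : List Int := pvGoA end_ 2 (by omega)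

-- ===== PORT B =====
-- B's binary search for the largest k with k^3 ≤ end_ (the while lo < hi loop).
def pvBsB (end_ lo hi : Int) : Int :=
  if h : lo < hi then
    let mid := PySem.Int.floordiv (lo + hi + 1) 2
    if mid ^ 3 ≤ end_ then pvBsB end_ mid hi else pvBsB end_ lo (mid - 1)
  else lo
termination_by (hi - lo).toNat
decreasing_by
  all_goals
    have hm : PySem.Int.floordiv (lo + hi + 1) 2 = (lo + hi + 1) / 2 :=
      PySem.Int.floordiv_eq_ediv_of_pos (by omega)
    omega

def generate_cube_numbers_alt (end_ : Int) : List Int :=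
  if end_ < 8 then []
  else (PySem.List.pyRange 2 (pvBsB end_ 2 end_ + 1) 1).map (fun i => i ^ 3)

-- ===== PRECONDITION & SPEC =====
def Spec_generate_cube_numbers (end_ : Int) (out : List Int) : Prop := out = generate_cube_numbers_alt end_
instance (end_ : Int) (out : List Int) : Decidable (Spec_generate_cube_numbers end_ out) := by unfold Spec_generate_cube_numbers; infer_instance

-- ===== CLAIM (what is proved, stated in full; the proofs are below) =====
def Claim_equal_generate_cube_numbers : Prop := ∀ (end_ : Int), Dom_generate_cube_numbers end_ → Spec_generate_cube_numbers end_ (generate_cube_numbers end_)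

-- ===== LEMMAS AND PROOFS =====

-- cube is monotone on nonnegatives
theorem pv_cube_lt {a b : Int} (ha : 0 ≤ a) (hab : a < b) : a ^ 3 < b ^ 3 :=
  pow_lt_pow_left₀ hab ha (by norm_num)

-- binary-search invariant: result is the largest k with k^3 ≤ end_
theorem pvBsB_spec (end_ : Int) : ∀ lo hi : Int, 2 ≤ lo → lo ≤ hi →
    lo ^ 3 ≤ end_ → end_ < (hi + 1) ^ 3 →
    2 ≤ pvBsB end_ lo hi ∧ (pvBsB end_ lo hi) ^ 3 ≤ end_ ∧ end_ < (pvBsB end_ lo hi + 1) ^ 3 := by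
  intro lo hi
  induction lo, hi using pvBsB.induct end_ with
  | case1 lo hi h mid hmid ih =>
    intro h2 hle hlo hhi
    rw [pvBsB]
    simp only [dif_pos h]
    have hm : mid = (lo + hi + 1) / 2 := PySem.Int.floordiv_eq_ediv_of_pos (by omega)
    simp only [show PySem.Int.floordiv (lo + hi + 1) 2 = mid from rfl, if_pos hmid]
    exact ih (by omega) (by omega) hmid hhi
  | case2 lo hi h mid hmid ih =>
    intro h2 hle hlo hhi
    rw [pvBsB]
    simp only [dif_pos h]
    have hm : mid = (lo + hi + 1) / 2 := PySem.Int.floordiv_eq_ediv_of_pos (by omega)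
    simp only [show PySem.Int.floordiv (lo + hi + 1) 2 = mid from rfl, if_neg hmid]
    have hmid' : end_ < mid ^ 3 := by omega
    have hco : mid - 1 + 1 = mid := by ring
    exact ih h2 (by omega) hlo (by rw [hco]; exact hmid')
  | case3 lo hi h =>
    intro h2 hle hlo hhi
    rw [pvBsB]
    simp only [dif_neg h]
    have : lo = hi := by omega
    subst this
    exact ⟨h2, hlo, hhi⟩

-- A's loop from num produces exactly the cubes of num..k, where k is the cube-root bound
theorem pvGoA_eq (end_ k : Int) (hk2 : 2 ≤ k) (hk : k ^ 3 ≤ end_) (hk1 : end_ < (k + 1) ^ 3) :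
    ∀ num : Int, ∀ h : 2 ≤ num,
      pvGoA end_ num h = (PySem.List.pyRange num (k + 1) 1).map (fun i => i ^ 3) := by
  intro num h
  induction num, h using pvGoA.induct end_ with
  | case1 num h hstop =>
    rw [pvGoA]
    simp only [if_pos hstop]
    have hnk : k < num := by
      by_contra hc
      push Not at hc
      have : num ^ 3 ≤ k ^ 3 := by
        rcases lt_or_eq_of_le hc with hlt | heq
        · exact le_of_lt (pv_cube_lt (by omega) hlt)
        · rw [heq]
      omega
    rw [PySem.List.pyRange_one_eq_nil (by omega)]
    simp
  | case2 num h hgo ih =>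
    rw [pvGoA]
    simp only [if_neg hgo]
    push Not at hgo
    have hnk : num ≤ k := by
      by_contra hc
      push Not at hc
      have : (k + 1) ^ 3 ≤ num ^ 3 := by
        rcases lt_or_eq_of_le (show k + 1 ≤ num by omega) with hlt | heq
        · exact le_of_lt (pv_cube_lt (by omega) hlt)
        · rw [heq]
      omega
    rw [PySem.List.pyRange_one_cons (by omega)]
    simp [ih]

-- ===== VERDICT (by name: the statement is the Claim_ definition above) =====
theorem generate_cube_numbers_spec : Claim_equal_generate_cube_numbers := by
  unfold Claim_equal_generate_cube_numbers Spec_generate_cube_numbers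
  intro end_ _
  unfold generate_cube_numbers generate_cube_numbers_alt
  by_cases h8 : end_ < 8
  · rw [if_pos h8, pvGoA]
    simp only [if_pos (by norm_num; omega : (2:Int) ^ 3 > end_)]
  · rw [if_neg h8]
    push Not at h8
    have hself : end_ + 1 ≤ (end_ + 1) ^ 3 := le_self_pow₀ (by omega) (by norm_num)
    obtain ⟨hk2, hk, hk1⟩ := pvBsB_spec end_ 2 end_ (by omega) (by omega) (by norm_num; omega) (by omega)
    exact pvGoA_eq end_ _ hk2 hk hk1 2 (by omega)
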